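-- pv_equiv track=rewrite | github.com/richarddahl/notorm | devtools/docs/renderers.py | _render_examples_index
-- ===== SOURCE A (Python) =====
-- from typing import Dict, List, Optional, Any, Set, Union
--
-- def _render_examples_index(examples: list[dict[str, Any]]) -> str:
--     """
--     Render examples index.
--
--     Args:
--         examples: List of example data
--
--     Returns:
--         Rendered examples index content
--     """
--     lines = []
--     lines.append("# Code Examples")
--     lines.append("")
--     lines.append("This section contains code examples and usage patterns.")
--     lines.append("")
--
--     # Group examples by module
--     examples_by_module = {}
--     for example in examples:
--         module = example.get("module", "Default")
--         if module not in examples_by_module: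
--             examples_by_module[module] = []
--         examples_by_module[module].append(example)
--
--     # Add examples by module
--     for module, module_examples in sorted(examples_by_module.items()):
--         lines.append(f"## {module}")
--         lines.append("")
--
--         for example in module_examples:
--             example_name = (
--                 example.get("name", "").replace("/", "_")
--                 or f"example_{len(examples_by_module)}"
--             )
--             desc = (
--                 example.get("description", "").split(".")[0] + "."
--                 if example.get("description")
--                 else ""
--             )
--
--             lines.append(f"- [{example_name}]({example_name}.md): {desc}")
--
--         lines.append("")
--
--     return "\n".join(lines)
-- ===== SOURCE B (Python) =====
-- def _render_examples_index(examples: list) -> str: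
--     """Render examples index (grouping via sorted distinct modules + per-module filter)."""
--     def mod(ex):
--         return ex.get("module", "Default")
--
--     modules = sorted({mod(ex) for ex in examples})
--     n = len(modules)
--     lines = [
--         "# Code Examples",
--         "",
--         "This section contains code examples and usage patterns.",
--         "",
--     ]
--     for m in modules:
--         lines.append(f"## {m}")
--         lines.append("")
--         for ex in examples:
--             if mod(ex) != m:
--                 continue
--             name = ex.get("name", "").replace("/", "_") or f"example_{n}"
--             desc = (
--                 ex.get("description", "").split(".")[0] + "."
--                 if ex.get("description")
--                 else ""
--             )
--             lines.append(f"- [{name}]({name}.md): {desc}")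
--         lines.append("")
--     return "\n".join(lines)
-- ===== Notes on version B (the rewrite author's own statement) =====
-- stated objective: idiomatic
-- what changed: B replaces A's incremental dict-of-lists grouping followed by sorting the dict items with a direct pass over the sorted distinct module names, selecting each module's examples by filtering the input list per module.
import Mathlib
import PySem

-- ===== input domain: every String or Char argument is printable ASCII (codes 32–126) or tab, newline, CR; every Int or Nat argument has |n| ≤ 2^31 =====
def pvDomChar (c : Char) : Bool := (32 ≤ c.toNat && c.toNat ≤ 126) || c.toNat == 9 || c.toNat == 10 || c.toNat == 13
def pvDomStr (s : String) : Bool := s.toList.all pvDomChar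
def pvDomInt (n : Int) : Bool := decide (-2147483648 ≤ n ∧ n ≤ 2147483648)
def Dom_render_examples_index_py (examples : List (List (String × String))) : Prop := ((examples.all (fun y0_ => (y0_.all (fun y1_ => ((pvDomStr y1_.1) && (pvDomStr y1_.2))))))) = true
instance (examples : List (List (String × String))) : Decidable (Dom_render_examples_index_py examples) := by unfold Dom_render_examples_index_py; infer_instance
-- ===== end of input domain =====

-- B groups by iterating the sorted distinct module names and filtering the input per module,
-- instead of A's incremental dict-of-lists grouping followed by sorting the dict items (return values proved equal).

-- ex.get(k, d) on an association list (first match wins, per the dict convention); shared by both ports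
def pvGetAttr (ex : List (String × String)) (k d : String) : String :=
  match ex.find? (fun p => p.1 == k) with
  | some p => p.2
  | none => d

def pvMod (ex : List (String × String)) : String := pvGetAttr ex "module" "Default"

-- one '- [name](name.md): desc' line; the name/desc logic is character-identical in A and B
def pvLine (n : Nat) (ex : List (String × String)) : String :=
  let name0 := PySem.Str.replace (pvGetAttr ex "name" "") "/" "_"
  let ename := if name0 = "" then "example_" ++ PySem.Int.toStr (n : Int) else name0
  let d := pvGetAttr ex "description" ""
  let desc := if d ≠ "" then (((PySem.Str.split? d ".").getD []).headD "") ++ "." else ""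
  "- [" ++ ename ++ "](" ++ ename ++ ".md): " ++ desc

def pvHeader : List String :=
  ["# Code Examples", "", "This section contains code examples and usage patterns.", ""]

-- ===== PORT A =====
def render_examples_index_py (examples : List (List (String × String))) : String :=
  let g : PySem.Dict String (List (List (String × String))) :=
    examples.foldl (fun d ex =>
      let m := pvMod ex
      let d := if d.contains m then d else d.insert m []
      d.modify m [] (fun l => l ++ [ex])) PySem.Dict.empty
  -- sorted(g.items()): dict keys are unique, so Python's tuple order on items is the key order
  let items := PySem.List.sorted g.items (fun p => p.1) false
  let lines := items.foldl (fun (ls : List String) p =>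
      ((ls ++ ["## " ++ p.1, ""]) ++ p.2.map (pvLine g.size)) ++ [""]) pvHeader
  PySem.Str.join "\n" lines

-- ===== PORT B =====
def render_examples_index_py_alt (examples : List (List (String × String))) : String :=
  let mods := PySem.List.sorted (PySem.Set.ofList (examples.map pvMod)) (fun x => x) false
  let n := mods.length
  let lines := mods.foldl (fun (ls : List String) m =>
      ((ls ++ ["## " ++ m, ""]) ++ (examples.filter (fun ex => pvMod ex == m)).map (pvLine n)) ++ [""]) pvHeader
  PySem.Str.join "\n" lines

-- ===== PRECONDITION & SPEC =====
def Spec_render_examples_index_py (examples : List (List (String × String))) (out : String) : Prop := out = render_examples_index_py_alt examples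
instance (examples : List (List (String × String))) (out : String) : Decidable (Spec_render_examples_index_py examples out) := by unfold Spec_render_examples_index_py; infer_instance

-- ===== CLAIM (what is proved, stated in full; the proofs are below) =====
def Claim_equal_render_examples_index_py : Prop := ∀ (examples : List (List (String × String))), Dom_render_examples_index_py examples → Spec_render_examples_index_py examples (render_examples_index_py examples)

-- ===== LEMMAS AND PROOFS =====

-- one grouping step, seen through getD
theorem pv_step_getD (d : PySem.Dict String (List (List (String × String))))
    (ex : List (String × String)) (m : String) :
    ((if d.contains (pvMod ex) then d else d.insert (pvMod ex) []).modify (pvMod ex) []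
        (fun l => l ++ [ex])).getD m []
      = if pvMod ex == m then d.getD m [] ++ [ex] else d.getD m [] := by
  rcases eq_or_ne (pvMod ex) m with hm | hm
  · subst hm
    by_cases hc : d.contains (pvMod ex) = true
    · simp [hc, PySem.Dict.getD_modify_self]
    · simp only [Bool.not_eq_true] at hc
      simp [hc, PySem.Dict.getD_modify_self, PySem.Dict.getD_insert_self,
        PySem.Dict.getD_of_not_contains d _ hc]
  · have hb : (pvMod ex == m) = false := by simp [hm]
    by_cases hc : d.contains (pvMod ex) = true
    · simp [hc, hb, PySem.Dict.getD_modify_of_ne d _ _ (Ne.symm hm)]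
    · simp only [Bool.not_eq_true] at hc
      simp [hc, hb, PySem.Dict.getD_modify_of_ne _ _ _ (Ne.symm hm),
        PySem.Dict.getD_insert_of_ne d _ _ (Ne.symm hm)]

-- one grouping step, seen through keys
theorem pv_step_keys (d : PySem.Dict String (List (List (String × String))))
    (ex : List (String × String)) :
    ((if d.contains (pvMod ex) then d else d.insert (pvMod ex) []).modify (pvMod ex) []
        (fun l => l ++ [ex])).keys = PySem.Set.add d.keys (pvMod ex) := by
  by_cases hc : d.contains (pvMod ex) = true
  · simp [PySem.Dict.keys_modify, PySem.Dict.keys_insert_of_contains _ _ hc,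
      PySem.Set.add, PySem.Set.contains, ← PySem.Dict.contains_eq_decide_mem_keys, hc]
  · simp only [Bool.not_eq_true] at hc
    simp [hc, PySem.Dict.keys_modify,
      PySem.Dict.keys_insert_of_contains _ _ (PySem.Dict.contains_insert_self d _ _),
      PySem.Dict.keys_insert_of_not_contains d _ hc,
      PySem.Set.add, PySem.Set.contains, ← PySem.Dict.contains_eq_decide_mem_keys]

theorem pv_fold_getD (examples : List (List (String × String)))
    (d : PySem.Dict String (List (List (String × String)))) (m : String) :
    (examples.foldl (fun d ex =>
      (if d.contains (pvMod ex) then d else d.insert (pvMod ex) []).modify (pvMod ex) []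
        (fun l => l ++ [ex])) d).getD m []
      = d.getD m [] ++ examples.filter (fun ex => pvMod ex == m) := by
  induction examples generalizing d with
  | nil => simp
  | cons x xs ih =>
    simp only [List.foldl_cons, ih, pv_step_getD, List.filter_cons]
    by_cases hb : (pvMod x == m) = true <;> simp [hb]

theorem pv_fold_keys (examples : List (List (String × String)))
    (d : PySem.Dict String (List (List (String × String)))) :
    (examples.foldl (fun d ex =>
      (if d.contains (pvMod ex) then d else d.insert (pvMod ex) []).modify (pvMod ex) []
        (fun l => l ++ [ex])) d).keys
      = PySem.Set.update d.keys (examples.map pvMod) := by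
  induction examples generalizing d with
  | nil => simp [PySem.Set.update]
  | cons x xs ih =>
    simp only [List.foldl_cons, ih, pv_step_keys, List.map_cons, PySem.Set.update]

-- ===== VERDICT (by name: the statement is the Claim_ definition above) =====
theorem render_examples_index_py_spec : Claim_equal_render_examples_index_py := by
  intro examples _
  unfold Spec_render_examples_index_py render_examples_index_py render_examples_index_py_alt
  simp only []
  set G := examples.foldl (fun d ex =>
      (if d.contains (pvMod ex) then d else d.insert (pvMod ex) []).modify (pvMod ex) []
        (fun l => l ++ [ex])) PySem.Dict.empty with hG
  set mods := PySem.List.sorted (PySem.Set.ofList (examples.map pvMod)) (fun x => x) false with hmods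
  have hkeys : G.keys = PySem.Set.ofList (examples.map pvMod) := by
    rw [hG, pv_fold_keys, PySem.Dict.keys_empty, PySem.Set.update_nil_left]
  have hnd : G.keys.Nodup := by rw [hkeys]; exact PySem.Set.nodup_ofList _
  have hgetD : ∀ m, G.getD m [] = examples.filter (fun ex => pvMod ex == m) := by
    intro m; rw [hG, pv_fold_getD]; simp [PySem.Dict.getD_empty]
  have hitems : G.items = G.keys.map (fun k => (k, examples.filter (fun ex => pvMod ex == k))) := by
    rw [PySem.Dict.items_eq_map_keys G hnd []]
    exact List.map_congr_left (fun k _ => by rw [hgetD])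
  have hsorted : PySem.List.sorted G.items (fun p => p.1) false
      = mods.map (fun m => (m, examples.filter (fun ex => pvMod ex == m))) := by
    apply PySem.List.sorted_eq_of_perm_of_pairwise_lt
    · rw [hitems, hkeys]
      exact (PySem.List.sorted_perm _ _ _).map _
    · have := PySem.List.sorted_ofList_pairwise_lt (examples.map pvMod)
      rw [← hmods] at this
      exact (List.pairwise_map).2 this
  have hsize : G.size = mods.length := by
    have h1 : G.size = G.items.length := rfl
    rw [h1, hitems, List.length_map, hkeys, hmods, PySem.List.length_sorted]
  rw [hsorted, hsize, List.foldl_map]
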